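-- pv_equiv track=rewrite | github.com/MingSun-Tse/smilelogging | smilelogging/slutils.py | standardize_metricline
-- ===== SOURCE A (Python) =====
-- def standardize_metricline(line):
--     r"""Make metric line in standard form.
--     """
--     for m in ['(', ')', '[', ']', '<', '>', '|', ',', '.', ';', '!', '?',]: # Some non-numerical, no-meaning marks
--         if m in line:
--             line = line.replace(m, f' {m} ')
--     if ':' in line:
--         line = line.replace(':', ' ')
--     line = ' '.join(line.split())
--     return line
-- ===== SOURCE B (Python) =====
-- def standardize_metricline(line):
--     """Single pass over the characters instead of repeated str.replace scans."""
--     marks = set('()[]<>|,.;!?')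
--     out = []
--     for c in line:
--         if c in marks:
--             out.append(' ' + c + ' ')
--         elif c == ':':
--             out.append(' ')
--         else:
--             out.append(c)
--     return ' '.join(''.join(out).split())
-- ===== Notes on version B (the rewrite author's own statement) =====
-- stated objective: simpler
-- what changed: B builds the expanded text in one character-level pass (padding each punctuation mark with spaces and turning a colon into a space) instead of A's twelve conditional str.replace scans plus a colon pass; both then collapse whitespace the same way.
import Mathlib
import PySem

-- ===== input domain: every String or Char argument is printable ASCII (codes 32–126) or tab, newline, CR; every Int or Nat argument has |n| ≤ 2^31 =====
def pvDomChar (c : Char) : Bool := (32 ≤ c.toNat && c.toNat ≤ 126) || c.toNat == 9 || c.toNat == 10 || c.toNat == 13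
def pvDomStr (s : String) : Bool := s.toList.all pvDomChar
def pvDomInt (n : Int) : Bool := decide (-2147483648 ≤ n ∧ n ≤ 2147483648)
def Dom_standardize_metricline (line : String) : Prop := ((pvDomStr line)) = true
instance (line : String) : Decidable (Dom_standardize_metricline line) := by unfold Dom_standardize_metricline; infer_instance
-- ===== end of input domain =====

-- B replaces A's twelve conditional str.replace scans (plus a colon pass) by one character-level
-- pass building the expanded text directly; objective: simpler.

-- ===== PORT A =====
-- the marks A loops over, in A's order
def pvMarksA : List Char := ['(', ')', '[', ']', '<', '>', '|', ',', '.', ';', '!', '?']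

def standardize_metricline (line : String) : String :=
  let l1 := pvMarksA.foldl (fun s m =>
    if PySem.Str.isIn (String.ofList [m]) s then
      PySem.Str.replace s (String.ofList [m]) (String.ofList [' ', m, ' '])
    else s) line
  let l2 := if PySem.Str.isIn ":" l1 then PySem.Str.replace l1 ":" " " else l1
  PySem.Str.join " " (PySem.Str.split₀ l2)

-- ===== PORT B =====
def standardize_metricline_alt (line : String) : String :=
  let marks := PySem.Set.ofList ['(', ')', '[', ']', '<', '>', '|', ',', '.', ';', '!', '?']
  let out := line.toList.foldl (fun acc c =>
    if PySem.Set.contains marks c then acc ++ [' ', c, ' ']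
    else if c = ':' then acc ++ [' ']
    else acc ++ [c]) []
  PySem.Str.join " " (PySem.Str.split₀ (String.ofList out))

-- ===== PRECONDITION & SPEC =====
def Spec_standardize_metricline (line : String) (out : String) : Prop := out = standardize_metricline_alt line
instance (line : String) (out : String) : Decidable (Spec_standardize_metricline line out) := by unfold Spec_standardize_metricline; infer_instance

-- ===== CLAIM (what is proved, stated in full; the proofs are below) =====
def Claim_equal_standardize_metricline : Prop := ∀ (line : String), Dom_standardize_metricline line → Spec_standardize_metricline line (standardize_metricline line)

-- ===== LEMMAS AND PROOFS =====

-- what one str.replace pass of A does to a single character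
def pvExpA (m c : Char) : List Char := if c = m then [' ', m, ' '] else [c]
-- A's colon pass on a single character
def pvExpC (c : Char) : List Char := if c = ':' then [' '] else [c]
-- B's per-character expansion
def pvFB (c : Char) : List Char :=
  if PySem.Set.contains (PySem.Set.ofList ['(', ')', '[', ']', '<', '>', '|', ',', '.', ';', '!', '?']) c
  then [' ', c, ' '] else if c = ':' then [' '] else [c]
-- all thirteen of A's passes, as character-level flatMaps
def pvChain (l : List Char) : List Char :=
  ((((((((((((l.flatMap (pvExpA '(')).flatMap (pvExpA ')')).flatMap (pvExpA '[')).flatMap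
    (pvExpA ']')).flatMap (pvExpA '<')).flatMap (pvExpA '>')).flatMap (pvExpA '|')).flatMap
    (pvExpA ',')).flatMap (pvExpA '.')).flatMap (pvExpA ';')).flatMap (pvExpA '!')).flatMap
    (pvExpA '?')).flatMap pvExpC

theorem pv_go_single (m : Char) (new : List Char) :
    ∀ (s acc : List Char) (fuel : Nat), s.length ≤ fuel →
      PySem.Chars.replace.go [m] new fuel s acc
        = acc.reverse ++ s.flatMap (fun c => if c = m then new else [c]) := by
  intro s
  induction s with
  | nil => intro acc fuel _; cases fuel <;> simp [PySem.Chars.replace.go]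
  | cons c t ih =>
    intro acc fuel hf
    cases fuel with
    | zero => simp at hf
    | succ f =>
      simp only [List.length_cons, Nat.add_le_add_iff_right] at hf
      by_cases h : c = m
      · subst h
        simp only [PySem.Chars.replace.go, List.isPrefixOf]
        simp [ih (new.reverse ++ acc) f hf]
      · simp only [PySem.Chars.replace.go, List.isPrefixOf]
        have hb : (m == c) = false := by simp [Ne.symm h]
        simp [hb, ih (c :: acc) f hf, h]

theorem pv_replace_single (m : Char) (new : List Char) (s : List Char) :
    PySem.Chars.replace s [m] new = s.flatMap (fun c => if c = m then new else [c]) := by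
  simp [PySem.Chars.replace, pv_go_single m new s [] s.length le_rfl]

theorem pv_not_mem_of_isIn_false (m : Char) (l : List Char)
    (h : PySem.Chars.isIn [m] l = false) : m ∉ l := by
  intro hm
  rw [PySem.Chars.isIn] at h
  simp at h
  rw [← PySem.Chars.findFrom_zero] at h
  have h2 := PySem.Chars.findFrom_natCast_eq_neg_one_iff l [m] 0 (by simp)
  simp only [Nat.cast_zero, List.drop_zero] at h2
  rw [h2] at h
  obtain ⟨u, v, rfl⟩ := List.append_of_mem hm
  exact h ⟨u, v, by simp⟩

theorem pv_flatMap_id (m : Char) (new : List Char) (l : List Char) (h : m ∉ l) :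
    l.flatMap (fun c => if c = m then new else [c]) = l := by
  induction l with
  | nil => simp
  | cons c t ih =>
    simp only [List.mem_cons, not_or] at h
    simp [Ne.symm, h.1, ih h.2]

-- one conditional replace pass of A, at the character level
theorem pv_stepA (s : String) (m : Char) :
    (if PySem.Str.isIn (String.ofList [m]) s then
        PySem.Str.replace s (String.ofList [m]) (String.ofList [' ', m, ' '])
      else s).toList = s.toList.flatMap (pvExpA m) := by
  by_cases h : PySem.Chars.isIn [m] s.toList = true
  · simp [PySem.Str.replace, pv_replace_single, h]
    rfl
  · simp only [Bool.not_eq_true] at h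
    have hm : m ∉ s.toList := pv_not_mem_of_isIn_false m _ h
    simp only [PySem.Str.isIn_eq, String.toList_ofList, h, Bool.false_eq_true, if_false]
    unfold pvExpA
    exact (pv_flatMap_id m _ _ hm).symm

theorem pv_stepC (s : String) :
    (if PySem.Str.isIn ":" s then PySem.Str.replace s ":" " " else s).toList
      = s.toList.flatMap pvExpC := by
  have hc : (":" : String).toList = [':'] := rfl
  by_cases h : PySem.Chars.isIn [':'] s.toList = true
  · simp [PySem.Str.replace, hc, pv_replace_single, h]
    rfl
  · simp only [Bool.not_eq_true] at h
    have hm : ':' ∉ s.toList := pv_not_mem_of_isIn_false ':' _ h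
    simp only [PySem.Str.isIn_eq, hc, h, Bool.false_eq_true, if_false]
    unfold pvExpC
    exact (pv_flatMap_id ':' _ _ hm).symm

theorem pv_foldA (ms : List Char) (s : String) :
    (ms.foldl (fun s m =>
        if PySem.Str.isIn (String.ofList [m]) s then
          PySem.Str.replace s (String.ofList [m]) (String.ofList [' ', m, ' '])
        else s) s).toList
      = ms.foldl (fun l m => l.flatMap (pvExpA m)) s.toList := by
  induction ms generalizing s with
  | nil => rfl
  | cons m t ih =>
    simp only [List.foldl_cons]
    rw [ih, pv_stepA]
theorem pv_chain_append (a b : List Char) : pvChain (a ++ b) = pvChain a ++ pvChain b := by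
  simp [pvChain]

theorem pv_chain_single (c : Char) : pvChain [c] = pvFB c := by
  by_cases h1 : c = '('; · subst h1; decide
  by_cases h2 : c = ')'; · subst h2; decide
  by_cases h3 : c = '['; · subst h3; decide
  by_cases h4 : c = ']'; · subst h4; decide
  by_cases h5 : c = '<'; · subst h5; decide
  by_cases h6 : c = '>'; · subst h6; decide
  by_cases h7 : c = '|'; · subst h7; decide
  by_cases h8 : c = ','; · subst h8; decide
  by_cases h9 : c = '.'; · subst h9; decide
  by_cases h10 : c = ';'; · subst h10; decide
  by_cases h11 : c = '!'; · subst h11; decide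
  by_cases h12 : c = '?'; · subst h12; decide
  by_cases h13 : c = ':'; · subst h13; decide
  simp [pvChain, pvExpA, pvExpC, pvFB,
    h1, h2, h3, h4, h5, h6, h7, h8, h9, h10, h11, h12, h13]

theorem pv_chain_eq (l : List Char) : pvChain l = l.flatMap pvFB := by
  induction l with
  | nil => decide
  | cons c t ih =>
    have : (c :: t) = [c] ++ t := rfl
    rw [this, pv_chain_append, pv_chain_single, ih]
    simp

theorem pv_foldl_append_eq_flatMap (l : List Char) (f : Char → List Char) (a : List Char) :
    l.foldl (fun acc x => acc ++ f x) a = a ++ l.flatMap f := by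
  induction l generalizing a with
  | nil => simp
  | cons c t ih => simp [ih]

-- ===== VERDICT (by name: the statement is the Claim_ definition above) =====
theorem standardize_metricline_spec : Claim_equal_standardize_metricline := by
  intro line _
  unfold Spec_standardize_metricline standardize_metricline standardize_metricline_alt
  dsimp only []
  refine congrArg (fun s => PySem.Str.join " " (PySem.Str.split₀ s)) ?_
  have hB : (line.toList.foldl (fun acc c =>
      if PySem.Set.contains (PySem.Set.ofList ['(', ')', '[', ']', '<', '>', '|', ',', '.', ';', '!', '?']) c
      then acc ++ [' ', c, ' ']
      else if c = ':' then acc ++ [' ']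
      else acc ++ [c]) []) = line.toList.flatMap pvFB := by
    have hf : (fun (acc : List Char) (c : Char) =>
        if PySem.Set.contains (PySem.Set.ofList ['(', ')', '[', ']', '<', '>', '|', ',', '.', ';', '!', '?']) c
        then acc ++ [' ', c, ' ']
        else if c = ':' then acc ++ [' ']
        else acc ++ [c]) = (fun acc c => acc ++ pvFB c) := by
      funext acc c
      unfold pvFB
      split_ifs <;> rfl
    rw [hf, pv_foldl_append_eq_flatMap]
    rfl
  rw [hB]
  have hX : (if PySem.Str.isIn ":" (pvMarksA.foldl (fun s m =>
        if PySem.Str.isIn (String.ofList [m]) s then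
          PySem.Str.replace s (String.ofList [m]) (String.ofList [' ', m, ' '])
        else s) line) then
      PySem.Str.replace (pvMarksA.foldl (fun s m =>
        if PySem.Str.isIn (String.ofList [m]) s then
          PySem.Str.replace s (String.ofList [m]) (String.ofList [' ', m, ' '])
        else s) line) ":" " "
    else (pvMarksA.foldl (fun s m =>
        if PySem.Str.isIn (String.ofList [m]) s then
          PySem.Str.replace s (String.ofList [m]) (String.ofList [' ', m, ' '])
        else s) line)).toList = line.toList.flatMap pvFB := by
    rw [pv_stepC, pv_foldA, ← pv_chain_eq]
    simp only [pvMarksA, List.foldl]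
    rfl
  calc _ = String.ofList ((if PySem.Str.isIn ":" (pvMarksA.foldl (fun s m =>
        if PySem.Str.isIn (String.ofList [m]) s then
          PySem.Str.replace s (String.ofList [m]) (String.ofList [' ', m, ' '])
        else s) line) then
      PySem.Str.replace (pvMarksA.foldl (fun s m =>
        if PySem.Str.isIn (String.ofList [m]) s then
          PySem.Str.replace s (String.ofList [m]) (String.ofList [' ', m, ' '])
        else s) line) ":" " "
    else (pvMarksA.foldl (fun s m =>
        if PySem.Str.isIn (String.ofList [m]) s then
          PySem.Str.replace s (String.ofList [m]) (String.ofList [' ', m, ' '])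
        else s) line)).toList) := String.ofList_toList.symm
    _ = String.ofList (line.toList.flatMap pvFB) := by rw [hX]
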